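-- pv_equiv track=rewrite | github.com/phillegard/kmz2shapefile | src/kmz2shapefile/kmz_extractor.py | _find_kml_file
-- ===== SOURCE A (Python) =====
-- from typing import Optional
--
-- def _find_kml_file(filenames: list[str]) -> Optional[str]:
--     """
--     Find KML file in archive (case-insensitive).
--
--     Looks for doc.kml first, then any .kml file.
--
--     Args:
--         filenames: List of filenames in archive
--
--     Returns:
--         KML filename or None if not found
--     """
--     # Try doc.kml first (most common)
--     for name in filenames:
--         if name.lower() == 'doc.kml':
--             return name
--
--     # Fall back to any .kml file
--     for name in filenames:
--         if name.lower().endswith('.kml'):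
--             return name
--
--     return None
-- ===== SOURCE B (Python) =====
-- from typing import Optional
--
-- def _find_kml_file(filenames: list[str]) -> Optional[str]:
--     """Single pass: return doc.kml immediately; remember the first other .kml as fallback."""
--     fallback = None
--     for name in filenames:
--         low = name.lower()
--         if low == 'doc.kml':
--             return name
--         if fallback is None and low.endswith('.kml'):
--             fallback = name
--     return fallback
-- ===== Notes on version B (the rewrite author's own statement) =====
-- stated objective: simpler
-- what changed: Replaces A's two sequential scans with one single-pass loop that returns doc.kml immediately and keeps the first other .kml filename as a fallback.
import Mathlib
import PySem

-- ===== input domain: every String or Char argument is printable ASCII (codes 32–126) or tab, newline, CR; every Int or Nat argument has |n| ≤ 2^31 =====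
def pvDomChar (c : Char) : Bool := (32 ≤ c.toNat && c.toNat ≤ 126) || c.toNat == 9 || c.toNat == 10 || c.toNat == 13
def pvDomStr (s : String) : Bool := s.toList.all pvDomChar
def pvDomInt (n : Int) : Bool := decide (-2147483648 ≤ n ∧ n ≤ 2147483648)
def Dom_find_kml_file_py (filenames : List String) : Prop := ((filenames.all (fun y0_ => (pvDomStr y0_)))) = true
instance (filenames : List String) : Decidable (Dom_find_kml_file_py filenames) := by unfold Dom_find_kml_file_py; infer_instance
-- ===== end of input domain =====

-- B folds A's two sequential scans into one pass with a remembered fallback; objective: simpler.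
-- ===== PORT A =====
def pvFindDoc : List String → Option String
  | [] => none
  | n :: rest => if PySem.Str.lower n == "doc.kml" then some n else pvFindDoc rest

def pvFindKml : List String → Option String
  | [] => none
  | n :: rest => if PySem.Str.endswith (PySem.Str.lower n) ".kml" then some n else pvFindKml rest

def find_kml_file_py (filenames : List String) : Option String :=
  match pvFindDoc filenames with
  | some n => some n
  | none => pvFindKml filenames

-- ===== PORT B =====
def pvAltLoop : List String → Option String → Option String
  | [], fb => fb
  | n :: rest, fb =>
    let low := PySem.Str.lower n
    if low == "doc.kml" then some n
    else if fb.isNone && PySem.Str.endswith low ".kml" then pvAltLoop rest (some n)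
    else pvAltLoop rest fb

def find_kml_file_py_alt (filenames : List String) : Option String :=
  pvAltLoop filenames none

-- ===== PRECONDITION & SPEC =====
def Spec_find_kml_file_py (filenames : List String) (out : Option String) : Prop := out = find_kml_file_py_alt filenames
instance (filenames : List String) (out : Option String) : Decidable (Spec_find_kml_file_py filenames out) := by unfold Spec_find_kml_file_py; infer_instance

-- ===== CLAIM (what is proved, stated in full; the proofs are below) =====
def Claim_equal_find_kml_file_py : Prop := ∀ (filenames : List String), Dom_find_kml_file_py filenames → Spec_find_kml_file_py filenames (find_kml_file_py filenames)

-- ===== LEMMAS AND PROOFS =====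
theorem pvAltLoop_eq (l : List String) (fb : Option String) :
    pvAltLoop l fb =
      match pvFindDoc l with
      | some n => some n
      | none => match fb with
                | some x => some x
                | none => pvFindKml l := by
  induction l generalizing fb with
  | nil => cases fb <;> simp [pvAltLoop, pvFindDoc, pvFindKml]
  | cons n rest ih =>
    simp only [pvAltLoop, pvFindDoc, pvFindKml]
    by_cases hdoc : PySem.Str.lower n == "doc.kml"
    · simp [hdoc]
    · simp only [hdoc, if_false, ih]
      cases fb <;> by_cases hk : PySem.Str.endswith (PySem.Str.lower n) ".kml" <;>
        simp [hk] <;> cases pvFindDoc rest <;> simp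

-- ===== VERDICT (by name: the statement is the Claim_ definition above) =====
theorem find_kml_file_py_spec : Claim_equal_find_kml_file_py := by
  intro filenames _
  unfold Spec_find_kml_file_py find_kml_file_py find_kml_file_py_alt
  rw [pvAltLoop_eq]
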